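-- pv_equiv track=rewrite | github.com/Nitapol/game | board_positions.py | unique_rotations
-- ===== SOURCE A (Python) =====
-- rotation_clockwise = [6, 3, 0, 7, 4, 1, 8, 5, 2]
--
-- rotation_vertical_flip = [2, 1, 0, 5, 4, 3, 8, 7, 6]
--
-- def rotate(board, rotation):
--     return ''.join([board[index] for index in rotation])
--
-- def unique_rotations(original_board):
--     # _1_ _2_ _3_ _4_ _5_ _6_ _7_ _8_
--     # XO. ..X ... ... .OX ... ... X..
--     # ... ..O ... O.. ... ..O ... O..
--     # ... ... .OX X.. ... ..X XO. ...
--     rotations = [original_board]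
--
--     for i in range(3):
--         rotations.append(rotate(rotations[i], rotation_clockwise))
--     rotations.append(rotate(original_board, rotation_vertical_flip))
--     for i in range(4, 7):
--         rotations.append(rotate(rotations[i], rotation_clockwise))
--     rotations.sort()
--
--     unique = []
--     for rotation in rotations:
--         try:
--             unique.index(rotation)
--         except ValueError:
--             unique.append(rotation)
--     return unique
-- ===== SOURCE B (Python) =====
-- # The 7 non-identity dihedral permutation tables (rotations 90/180/270 and the
-- # four vertical-flip variants), precomputed so each variant is produced directly
-- # from the original board instead of by chaining rotate calls.
-- PERMS = [
--     [6, 3, 0, 7, 4, 1, 8, 5, 2],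
--     [8, 7, 6, 5, 4, 3, 2, 1, 0],
--     [2, 5, 8, 1, 4, 7, 0, 3, 6],
--     [2, 1, 0, 5, 4, 3, 8, 7, 6],
--     [8, 5, 2, 7, 4, 1, 6, 3, 0],
--     [6, 7, 8, 3, 4, 5, 0, 1, 2],
--     [0, 3, 6, 1, 4, 7, 2, 5, 8],
-- ]
--
-- def unique_rotations(original_board):
--     variants = {original_board}
--     for p in PERMS:
--         variants.add(''.join(original_board[i] for i in p))
--     return sorted(variants)
-- ===== Notes on version B (the rewrite author's own statement) =====
-- stated objective: simpler
-- what changed: B replaces A's chained construction (each rotation built by rotating the previous result) with seven precomputed dihedral permutation tables applied directly to the original board, and replaces A's sort-then-linear-index dedup loop with sorted(set(...)).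
import Mathlib
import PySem

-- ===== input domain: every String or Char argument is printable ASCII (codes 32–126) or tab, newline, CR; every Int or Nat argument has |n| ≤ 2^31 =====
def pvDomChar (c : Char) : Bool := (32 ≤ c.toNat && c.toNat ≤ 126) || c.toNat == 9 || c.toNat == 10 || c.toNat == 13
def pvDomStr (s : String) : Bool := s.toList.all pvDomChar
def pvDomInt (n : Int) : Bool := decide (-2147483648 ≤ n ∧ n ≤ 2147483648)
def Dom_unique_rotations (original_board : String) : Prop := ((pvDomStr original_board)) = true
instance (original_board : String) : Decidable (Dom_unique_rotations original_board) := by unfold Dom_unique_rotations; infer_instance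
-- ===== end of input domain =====

-- B builds each of the 7 non-identity variants directly from the original board with a
-- precomputed permutation table and returns sorted(set), instead of A's chained rotations
-- plus a sort-then-linear-index dedup loop. Objective: simpler.

-- ===== PORT A =====
def pvRotationClockwise : List Int := [6, 3, 0, 7, 4, 1, 8, 5, 2]
def pvRotationVerticalFlip : List Int := [2, 1, 0, 5, 4, 3, 8, 7, 6]

-- board[index] raises IndexError when the board is shorter than 9; Pre_ excludes that,
-- so the pyGetD default ' ' is never reached on admitted inputs.
def pvRotate (board : String) (rotation : List Int) : String :=
  String.ofList (rotation.map (fun index => PySem.List.pyGetD board.toList index ' '))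

def unique_rotations (original_board : String) : List String :=
  (PySem.List.sorted
    ((PySem.List.pyRange 4 7 1).foldl
      (fun rotations i => rotations ++ [pvRotate (PySem.List.pyGetD rotations i "") pvRotationClockwise])
      (((PySem.List.pyRange 0 3 1).foldl
        (fun rotations i => rotations ++ [pvRotate (PySem.List.pyGetD rotations i "") pvRotationClockwise])
        [original_board]) ++ [pvRotate original_board pvRotationVerticalFlip]))
    (fun x => x) false).foldl
    (fun unique rotation =>
      match PySem.List.index? unique rotation with
      | some _ => unique
      | none => unique ++ [rotation]) []

-- ===== PORT B =====
def pvPerms : List (List Int) :=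
  [[6, 3, 0, 7, 4, 1, 8, 5, 2],
   [8, 7, 6, 5, 4, 3, 2, 1, 0],
   [2, 5, 8, 1, 4, 7, 0, 3, 6],
   [2, 1, 0, 5, 4, 3, 8, 7, 6],
   [8, 5, 2, 7, 4, 1, 6, 3, 0],
   [6, 7, 8, 3, 4, 5, 0, 1, 2],
   [0, 3, 6, 1, 4, 7, 2, 5, 8]]

def pvApplyPerm (original_board : String) (p : List Int) : String :=
  String.ofList (p.map (fun i => PySem.List.pyGetD original_board.toList i ' '))

def unique_rotations_alt (original_board : String) : List String :=
  PySem.List.sorted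
    (pvPerms.foldl (fun variants p => PySem.Set.add variants (pvApplyPerm original_board p))
      (PySem.Set.ofList [original_board]))
    (fun x => x) false

-- ===== PRECONDITION & SPEC =====
-- Pre_: the board must have at least 9 characters; on shorter boards both A and B raise
-- IndexError (board[8] out of range).
def Pre_unique_rotations (original_board : String) : Prop := 9 ≤ original_board.toList.length

instance (original_board : String) : Decidable (Pre_unique_rotations original_board) := by
  unfold Pre_unique_rotations; infer_instance

def pvWitness_unique_rotations : String := "XO..X.O.X"

def Spec_unique_rotations (original_board : String) (out : List String) : Prop := out = unique_rotations_alt original_board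
instance (original_board : String) (out : List String) : Decidable (Spec_unique_rotations original_board out) := by unfold Spec_unique_rotations; infer_instance

-- ===== CLAIM (what is proved, stated in full; the proofs are below) =====
def Claim_equal_unique_rotations : Prop := ∀ (original_board : String), Dom_unique_rotations original_board → Pre_unique_rotations original_board → Spec_unique_rotations original_board (unique_rotations original_board)

-- ===== LEMMAS AND PROOFS =====

-- A's dedup step function is exactly PySem.Set.add.
theorem pv_step_eq_add :
    (fun (unique : List String) (rotation : String) =>
      match PySem.List.index? unique rotation with
      | some _ => unique
      | none => unique ++ [rotation]) = PySem.Set.add := by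
  funext u r
  rcases h : PySem.List.index? u r with _ | k
  · have hmem : r ∉ u := (PySem.List.index?_eq_none_iff u r).1 h
    simp [PySem.Set.add, hmem]
  · have hmem : r ∈ u := by
      by_contra hm
      rw [(PySem.List.index?_eq_none_iff u r).2 hm] at h
      simp at h
    simp [PySem.Set.add, hmem]

-- foldl Set.add appends a sublist of the consumed list.
theorem pv_foldl_add_sublist {α : Type} [DecidableEq α] (xs : List α) (s : List α) :
    ∃ t, xs.foldl PySem.Set.add s = s ++ t ∧ t.Sublist xs := by
  induction xs generalizing s with
  | nil => exact ⟨[], by simp⟩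
  | cons x xs ih =>
    by_cases hx : x ∈ s
    · obtain ⟨t, ht, hs⟩ := ih s
      refine ⟨t, ?_, hs.cons _⟩
      simpa [PySem.Set.add, hx] using ht
    · obtain ⟨t, ht, hs⟩ := ih (s ++ [x])
      refine ⟨x :: t, ?_, hs.cons₂ _⟩
      simp only [List.foldl_cons]
      rw [show PySem.Set.add s x = s ++ [x] by simp [PySem.Set.add, hx]]
      simpa using ht

theorem pv_ofList_sublist {α : Type} [DecidableEq α] (xs : List α) :
    (PySem.Set.ofList xs).Sublist xs := by
  obtain ⟨t, ht, hs⟩ := pv_foldl_add_sublist xs []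
  rw [PySem.Set.ofList_eq_foldl, ht]; simpa using hs

-- dedup of a sorted list = sorted of the dedup (both are the strictly increasing
-- enumeration of the distinct elements).
theorem pv_ofList_sorted_eq (L : List String) :
    PySem.Set.ofList (PySem.List.sorted L (fun x => x) false) =
      PySem.List.sorted (PySem.Set.ofList L) (fun x => x) false := by
  set S := PySem.List.sorted L (fun x => x) false with hS
  have hperm : (PySem.Set.ofList S).Perm (PySem.Set.ofList L) := by
    rw [List.perm_ext_iff_of_nodup (PySem.Set.nodup_ofList _) (PySem.Set.nodup_ofList _)]
    intro x
    simp [PySem.Set.mem_ofList, hS, PySem.List.mem_sorted]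
  have hle : S.Pairwise (fun a b => a ≤ b) := by
    simpa using PySem.List.sorted_pairwise (xs := L) (key := fun x => x)
  have hle' : (PySem.Set.ofList S).Pairwise (fun a b => a ≤ b) :=
    hle.sublist (pv_ofList_sublist S)
  have hne : (PySem.Set.ofList S).Pairwise (fun a b => a ≠ b) := PySem.Set.nodup_ofList S
  have hlt : (PySem.Set.ofList S).Pairwise (fun a b => a < b) :=
    (hle'.and hne).imp fun h => lt_of_le_of_ne h.1 h.2
  exact (PySem.List.sorted_eq_of_perm_of_pairwise_lt _ _ _ hperm hlt).symm

theorem pv_foldl_add_map {α β : Type} [DecidableEq β] (f : α → β) (l : List α) (s : List β) :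
    l.foldl (fun v p => PySem.Set.add v (f p)) s = (l.map f).foldl PySem.Set.add s :=
  (List.foldl_map (f := f) (g := PySem.Set.add) (l := l) (init := s)).symm

theorem pv_ofList_cons {α : Type} [DecidableEq α] (x : α) (l : List α) :
    l.foldl PySem.Set.add [x] = PySem.Set.ofList (x :: l) := by
  rw [PySem.Set.ofList_eq_foldl, List.foldl_cons]
  rfl

-- A's index-chained construction, fully evaluated, is B's variants list.
theorem pv_chain_eq (b : String) :
    List.foldl
      (fun rotations i => rotations ++ [pvRotate (PySem.List.pyGetD rotations i "") pvRotationClockwise])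
      (List.foldl
          (fun rotations i => rotations ++ [pvRotate (PySem.List.pyGetD rotations i "") pvRotationClockwise])
          [b] (PySem.List.pyRange 0 3) ++
        [pvRotate b pvRotationVerticalFlip])
      (PySem.List.pyRange 4 7)
    = b :: pvPerms.map (pvApplyPerm b) := by
  rw [show PySem.List.pyRange 0 3 = [(0 : Int), 1, 2] from rfl,
      show PySem.List.pyRange 4 7 = [(4 : Int), 5, 6] from rfl]
  simp [pvRotate, pvApplyPerm, pvPerms, pvRotationClockwise, pvRotationVerticalFlip,
    PySem.List.pyGetD]

-- ===== VERDICT (by name: the statement is the Claim_ definition above) =====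
theorem unique_rotations_spec : Claim_equal_unique_rotations := by
  intro b _ _
  show unique_rotations b = unique_rotations_alt b
  unfold unique_rotations unique_rotations_alt
  rw [pv_step_eq_add, ← PySem.Set.ofList_eq_foldl,
      pv_foldl_add_map (pvApplyPerm b) pvPerms,
      show PySem.Set.ofList [b] = [b] from rfl, pv_ofList_cons,
      pv_chain_eq b, pv_ofList_sorted_eq]
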